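-- pv_equiv track=rewrite | github.com/syamvenkatasai/Hdfc_phase2 | save_changes.py | generate_formula
-- ===== SOURCE A (Python) =====
-- def generate_formula(input_formula,mapping):
--     parts = []
--     current_part = ''
--     for char in input_formula:
--         if char in ['+', '-', '*', '/']:
--             parts.append(current_part)
--             parts.append(char)
--             current_part = ''
--         else:
--             current_part += char
--     parts.append(current_part)
--     output_parts = [mapping.get(part, part) for part in parts]
--     output_formula = ''.join(output_parts)
--     return output_formula
-- ===== SOURCE B (Python) =====
-- def generate_formula(input_formula, mapping):
--     def go(s, ops):
--         if not ops:
--             return mapping.get(s, s)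
--         op, rest = ops[0], ops[1:]
--         return mapping.get(op, op).join(go(piece, rest) for piece in s.split(op))
--     return go(input_formula, '+-*/')
-- ===== Notes on version B (the rewrite author's own statement) =====
-- stated objective: alternative
-- what changed: Replaces the char-by-char accumulator loop with a hierarchical split-and-join: recursively split on each of the four operators in turn with str.split and join the mapped sub-results with the mapped operator, so no token list or current_part state is ever built.
import Mathlib
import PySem

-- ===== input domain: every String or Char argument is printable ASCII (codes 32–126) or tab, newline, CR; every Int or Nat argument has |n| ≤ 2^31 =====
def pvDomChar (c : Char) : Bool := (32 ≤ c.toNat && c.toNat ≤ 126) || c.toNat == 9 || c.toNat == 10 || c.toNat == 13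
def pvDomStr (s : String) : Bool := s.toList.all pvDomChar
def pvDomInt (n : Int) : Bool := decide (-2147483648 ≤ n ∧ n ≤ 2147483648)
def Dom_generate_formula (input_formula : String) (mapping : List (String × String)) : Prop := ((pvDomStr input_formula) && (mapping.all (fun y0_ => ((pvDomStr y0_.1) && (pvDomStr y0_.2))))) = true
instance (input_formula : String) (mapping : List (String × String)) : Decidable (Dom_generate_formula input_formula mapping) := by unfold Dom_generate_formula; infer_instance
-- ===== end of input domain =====

-- B replaces A's char-by-char accumulator loop with a hierarchical split-and-join over the four operators (alternative decomposition, same cost).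

-- mapping.get(part, part) — shared by both ports
def gfLookup (mapping : List (String × String)) (p : List Char) : List Char :=
  (PySem.Dict.getD (PySem.Dict.mk mapping) (String.mk p) (String.mk p)).toList

-- ===== PORT A =====
def generate_formula (input_formula : String) (mapping : List (String × String)) : String :=
  -- the for-loop over input_formula with state (parts, current_part)
  let st := input_formula.toList.foldl
    (fun (st : List (List Char) × List Char) c =>
      if ['+', '-', '*', '/'].contains c then (st.1 ++ [st.2, [c]], []) else (st.1, st.2 ++ [c]))
    ([], [])
  let parts := st.1 ++ [st.2]
  String.mk (PySem.Chars.join [] (parts.map (gfLookup mapping)))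

-- ===== PORT B =====
-- go(s, ops): split s on the first operator, recurse on the pieces, join with the mapped operator
def gfGo (mapping : List (String × String)) : List Char → List Char → List Char
  | [], s => gfLookup mapping s
  | op :: rest, s =>
      PySem.Chars.join (gfLookup mapping [op])
        ((PySem.Chars.splitOn s [op]).map (fun p => gfGo mapping rest p))

def generate_formula_alt (input_formula : String) (mapping : List (String × String)) : String :=
  String.mk (gfGo mapping ['+', '-', '*', '/'] input_formula.toList)

-- ===== PRECONDITION & SPEC =====
def Spec_generate_formula (input_formula : String) (mapping : List (String × String)) (out : String) : Prop := out = generate_formula_alt input_formula mapping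
instance (input_formula : String) (mapping : List (String × String)) (out : String) : Decidable (Spec_generate_formula input_formula mapping out) := by unfold Spec_generate_formula; infer_instance

-- ===== CLAIM (what is proved, stated in full; the proofs are below) =====
def Claim_equal_generate_formula : Prop := ∀ (input_formula : String) (mapping : List (String × String)), Dom_generate_formula input_formula mapping → Spec_generate_formula input_formula mapping (generate_formula input_formula mapping)

-- ===== LEMMAS AND PROOFS =====

-- prepend a prefix onto the first token of a token list
def gfConsHead (x : List Char) : List (List Char) → List (List Char)
  | [] => [x]
  | t :: ts => (x ++ t) :: ts

-- simultaneous tokenization on a set of single-char delimiters (keeps the delimiters as tokens)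
def gfTok (ops : List Char) : List Char → List (List Char)
  | [] => [[]]
  | c :: cs => if ops.contains c then [] :: [c] :: gfTok ops cs else gfConsHead [c] (gfTok ops cs)

-- pieces between occurrences of one delimiter (= Python s.split(op))
def gfPieces (op : Char) : List Char → List (List Char)
  | [] => [[]]
  | c :: cs => if c = op then [] :: gfPieces op cs else gfConsHead [c] (gfPieces op cs)

theorem gfConsHead_consHead (a b : List Char) (l : List (List Char)) :
    gfConsHead a (gfConsHead b l) = gfConsHead (a ++ b) l := by
  cases l <;> simp [gfConsHead]

theorem gfTok_ne_nil (ops : List Char) (cs : List Char) : gfTok ops cs ≠ [] := by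
  cases cs with
  | nil => simp [gfTok]
  | cons c cs =>
    simp only [gfTok]
    split
    · simp
    · cases gfTok ops cs <;> simp [gfConsHead]

theorem gfPieces_ne_nil (op : Char) (cs : List Char) : gfPieces op cs ≠ [] := by
  cases cs with
  | nil => simp [gfPieces]
  | cons c cs =>
    simp only [gfPieces]
    split
    · simp
    · cases gfPieces op cs <;> simp [gfConsHead]

theorem gfConsHead_nil (l : List (List Char)) (h : l ≠ []) : gfConsHead [] l = l := by
  cases l with
  | nil => exact absurd rfl h
  | cons t ts => simp [gfConsHead]

theorem gfTok_nil_ops (cs : List Char) : gfTok [] cs = [cs] := by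
  induction cs with
  | nil => rfl
  | cons c cs ih => simp [gfTok, ih, gfConsHead]

-- A's loop builds exactly gfTok of the four operators
theorem gfFoldl_tok (cs : List Char) : ∀ (parts : List (List Char)) (cur : List Char),
    (cs.foldl
        (fun (st : List (List Char) × List Char) c =>
          if ['+', '-', '*', '/'].contains c then (st.1 ++ [st.2, [c]], []) else (st.1, st.2 ++ [c]))
        (parts, cur)).1
      ++ [(cs.foldl
        (fun (st : List (List Char) × List Char) c =>
          if ['+', '-', '*', '/'].contains c then (st.1 ++ [st.2, [c]], []) else (st.1, st.2 ++ [c]))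
        (parts, cur)).2]
    = parts ++ gfConsHead cur (gfTok ['+', '-', '*', '/'] cs) := by
  induction cs with
  | nil => intro parts cur; simp [gfTok, gfConsHead]
  | cons c cs ih =>
    intro parts cur
    simp only [List.foldl_cons, gfTok]
    by_cases hc : (['+', '-', '*', '/'] : List Char).contains c
    · simp only [hc, if_true, ih]
      rw [gfConsHead_nil _ (gfTok_ne_nil _ _)]
      simp [gfConsHead, List.append_assoc]
    · simp only [hc, Bool.false_eq_true, if_false, ih]
      rw [gfConsHead_consHead]

-- PySem.Chars.splitOn with a single-char separator is gfPieces
theorem gfSplitOn_go (op : Char) (l : List Char) : ∀ (fuel : Nat) (cur : List Char) (acc : List (List Char)),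
    l.length < fuel →
    PySem.Chars.splitOn.go [op] fuel l cur acc = acc.reverse ++ gfConsHead cur.reverse (gfPieces op l) := by
  induction l with
  | nil =>
    intro fuel cur acc h
    cases fuel with
    | zero => omega
    | succ fuel => simp [PySem.Chars.splitOn.go, gfPieces, gfConsHead]
  | cons c rest ih =>
    intro fuel cur acc h
    cases fuel with
    | zero => simp at h
    | succ fuel =>
      simp only [PySem.Chars.splitOn.go]
      simp only [List.length_cons] at h
      by_cases hc : c = op
      · subst hc
        rw [if_pos (by simp [List.isPrefixOf])]
        simp only [List.length_cons, List.length_nil, List.drop_succ_cons, List.drop_zero]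
        rw [ih fuel [] (cur.reverse :: acc) (by omega)]
        rw [List.reverse_nil, gfConsHead_nil _ (gfPieces_ne_nil _ _)]
        simp [gfPieces, gfConsHead, List.append_assoc]
      · rw [if_neg (by simp [List.isPrefixOf]; exact fun he => hc he.symm)]
        rw [ih fuel (c :: cur) acc (by omega)]
        simp only [gfPieces, if_neg hc, List.reverse_cons]
        rw [gfConsHead_consHead]

theorem gfSplitOn_eq (op : Char) (s : List Char) :
    PySem.Chars.splitOn s [op] = gfPieces op s := by
  unfold PySem.Chars.splitOn
  rw [gfSplitOn_go op s (s.length + 1) [] [] (by omega)]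
  simp [gfConsHead_nil _ (gfPieces_ne_nil _ _)]

-- hierarchical tokenization: splitting off one operator first
theorem gfTok_hier (op : Char) (ops : List Char) (s : List Char) :
    gfTok (op :: ops) s = List.intercalate [[op]] ((gfPieces op s).map (gfTok ops)) := by
  induction s with
  | nil => simp [gfTok, gfPieces, List.intercalate]
  | cons c cs ih =>
    by_cases hop : c = op
    · subst hop
      obtain ⟨p, ps, hp⟩ := List.exists_cons_of_ne_nil (gfPieces_ne_nil c cs)
      simp only [gfTok, gfPieces, if_pos rfl, List.contains_cons, beq_self_eq_true, Bool.true_or,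
        if_true, ih, hp, List.map_cons, List.intercalate]
      simp [List.intersperse]
    · obtain ⟨p, ps, hp⟩ := List.exists_cons_of_ne_nil (gfPieces_ne_nil op cs)
      have htokc : gfTok ops ([c] ++ p) = if ops.contains c then [] :: [c] :: gfTok ops p else gfConsHead [c] (gfTok ops p) := by
        simp only [List.singleton_append, gfTok]
      by_cases hc : ops.contains c
      · simp only [gfTok, gfPieces, if_neg hop, List.contains_cons, hc, Bool.or_true, if_true, ih,
          hp, List.map_cons, gfConsHead]
        rw [htokc, if_pos hc]
        cases ps <;> simp [List.intercalate, List.intersperse]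
      · have hcc : ¬ (((op :: ops) : List Char).contains c = true) := by
          simp only [List.contains_cons, Bool.or_eq_true, beq_iff_eq]
          rintro (h1 | h2)
          · exact hop h1
          · exact hc h2
        simp only [gfTok, gfPieces, if_neg hop, if_neg hcc, ih, hp,
          List.map_cons, gfConsHead]
        rw [htokc, if_neg hc]
        obtain ⟨t, ts, ht⟩ := List.exists_cons_of_ne_nil (gfTok_ne_nil ops p)
        rw [ht]
        cases ps <;> simp [List.intercalate, List.intersperse, gfConsHead]

-- join with empty separator is flatten
theorem gfJoin_nil_flatten (l : List (List Char)) : PySem.Chars.join [] l = l.flatten := by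
  induction l with
  | nil => simp [PySem.Chars.join, List.intercalate]
  | cons a l ih =>
    cases l with
    | nil => simp [PySem.Chars.join, List.intercalate, List.intersperse]
    | cons b l =>
      simp only [PySem.Chars.join, List.intercalate, List.intersperse, List.flatten] at *
      simp [ih]

theorem gfMap_intercalate (f : List Char → List Char) (sep : List Char) (G : List (List (List Char))) :
    List.map f (List.intercalate [sep] G) = List.intercalate [f sep] (G.map (List.map f)) := by
  induction G with
  | nil => simp [List.intercalate]
  | cons a G ih =>
    cases G with
    | nil => simp [List.intercalate, List.intersperse]
    | cons b G =>
      simp only [List.intercalate, List.intersperse, List.map_cons, List.map_append] at *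
      simp [ih]

theorem gfJoin_flat (sep : List Char) (H : List (List (List Char))) :
    PySem.Chars.join [] (List.intercalate [sep] H)
      = PySem.Chars.join sep (H.map (PySem.Chars.join [])) := by
  induction H with
  | nil => simp [PySem.Chars.join, List.intercalate]
  | cons a H ih =>
    cases H with
    | nil => simp [PySem.Chars.join, List.intercalate, List.intersperse]
    | cons b H =>
      have hx : List.intercalate [sep] (a :: b :: H) = a ++ [sep] ++ List.intercalate [sep] (b :: H) := by
        simp [List.intercalate, List.intersperse]
      rw [hx, gfJoin_nil_flatten, List.flatten_append, List.flatten_append]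
      rw [List.map_cons, List.map_cons, PySem.Chars.join_cons_cons]
      rw [← gfJoin_nil_flatten a]
      have hy : (List.intercalate [sep] (b :: H)).flatten = PySem.Chars.join [] (List.intercalate [sep] (b :: H)) := (gfJoin_nil_flatten _).symm
      rw [hy, ih]
      simp [List.append_assoc]

-- B computes the joined, mapped token list
theorem gfGo_spec (mapping : List (String × String)) (ops : List Char) : ∀ (s : List Char),
    gfGo mapping ops s = PySem.Chars.join [] ((gfTok ops s).map (gfLookup mapping)) := by
  induction ops with
  | nil => intro s; simp [gfGo, gfTok_nil_ops, PySem.Chars.join, List.intercalate]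
  | cons op rest ih =>
    intro s
    simp only [gfGo, gfSplitOn_eq, gfTok_hier, gfMap_intercalate, gfJoin_flat, List.map_map]
    congr 1
    refine List.map_congr_left fun p _ => ?_
    simpa [Function.comp] using ih p

-- ===== VERDICT (by name: the statement is the Claim_ definition above) =====
theorem generate_formula_spec : Claim_equal_generate_formula := by
  intro input_formula mapping _
  have h := gfFoldl_tok input_formula.toList [] []
  rw [gfConsHead_nil _ (gfTok_ne_nil _ _)] at h
  simp only [List.nil_append] at h
  simp only [Spec_generate_formula, generate_formula, generate_formula_alt]
  rw [gfGo_spec, h]
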